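-- pv_equiv track=rewrite | github.com/seolcoding/deep_news_oai | src/deep_news_oai/core/images.py | validate_image_url
-- ===== SOURCE A (Python) =====
-- def validate_image_url(url: str) -> bool:
--     """
--     Basic validation of image URL.
--
--     Args:
--         url: URL to validate
--
--     Returns:
--         True if URL looks like a valid image URL
--     """
--     if not url or not isinstance(url, str):
--         return False
--
--     url_lower = url.lower()
--
--     # Must be http(s)
--     if not url_lower.startswith(('http://', 'https://')):
--         return False
--
--     # Check for common image extensions or image CDN patterns
--     image_patterns = [
--         '.jpg', '.jpeg', '.png', '.gif', '.webp',
--         '/image/', '/images/', '/img/', '/photo/',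
--         'wimg.', 'img.', 'image.', 'cdn.',
--     ]
--
--     return any(pattern in url_lower for pattern in image_patterns)
-- ===== SOURCE B (Python) =====
-- _PATTERNS = ('.jpg .jpeg .png .gif .webp /image/ /images/ /img/ /photo/ '
--              'wimg. img. image. cdn.').split()
--
--
-- def validate_image_url(url: str) -> bool:
--     if not url or not isinstance(url, str):
--         return False
--     u = url.lower()
--     if not u.startswith(('http://', 'https://')):
--         return False
--     # single forward pass: NFA-style set of partially matched pattern tails
--     active = []
--     for ch in u:
--         nxt = []
--         for tail in active + _PATTERNS:
--             if tail[0] == ch: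
--                 rest = tail[1:]
--                 if not rest:
--                     return True
--                 nxt.append(rest)
--         active = nxt
--     return False
-- ===== Notes on version B (the rewrite author's own statement) =====
-- stated objective: alternative
-- what changed: B replaces the any()-over-13-patterns substring scan with a single forward NFA-style pass over the lowered URL that maintains the list of partially matched pattern tails and returns True the moment one completes.
import Mathlib
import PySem

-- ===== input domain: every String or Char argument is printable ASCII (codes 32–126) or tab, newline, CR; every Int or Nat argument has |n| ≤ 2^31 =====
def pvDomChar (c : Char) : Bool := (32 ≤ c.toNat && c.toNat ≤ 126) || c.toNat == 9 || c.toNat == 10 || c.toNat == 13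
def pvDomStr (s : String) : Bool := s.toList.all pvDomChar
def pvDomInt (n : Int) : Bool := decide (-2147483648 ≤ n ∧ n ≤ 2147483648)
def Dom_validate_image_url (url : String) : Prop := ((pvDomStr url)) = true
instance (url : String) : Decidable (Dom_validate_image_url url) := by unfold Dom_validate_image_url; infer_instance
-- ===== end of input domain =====

-- B replaces the 13 independent substring searches by a single forward NFA-style pass over
-- the lowered URL that maintains the list of partially matched pattern tails (objective:
-- alternative — a different algorithm of similar cost, same return value).

-- ===== PORT A =====
-- the `image_patterns` list of A, in order
def imagePatternsA : List (List Char) :=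
  [".jpg".toList, ".jpeg".toList, ".png".toList, ".gif".toList, ".webp".toList,
   "/image/".toList, "/images/".toList, "/img/".toList, "/photo/".toList,
   "wimg.".toList, "img.".toList, "image.".toList, "cdn.".toList]

def validate_image_url (url : String) : Bool :=
  -- `not url or not isinstance(url, str)`: url is always a str here, so only emptiness matters
  if url.toList.isEmpty then false
  else
    let url_lower := PySem.Chars.lower url.toList
    if !(PySem.Chars.startswith url_lower "http://".toList
         || PySem.Chars.startswith url_lower "https://".toList) then false
    else
      -- any(pattern in url_lower for pattern in image_patterns)
      imagePatternsA.any (fun p => PySem.Chars.isIn p url_lower)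

-- ===== PORT B =====
-- Source B builds `_PATTERNS` by splitting one space-separated string
def imagePatternsB : List (List Char) :=
  (PySem.Str.split₀ ".jpg .jpeg .png .gif .webp /image/ /images/ /img/ /photo/ wimg. img. image. cdn.").map String.toList

-- inner `for tail in active + _PATTERNS` loop of Source B; `none` = the early `return True`
-- (the `[] :: ts` case is unreachable in B, where every tail is nonempty; Python would
-- raise IndexError on `tail[0]` there)
def nfaStep (c : Char) : List (List Char) → Option (List (List Char))
  | [] => some []
  | [] :: ts => nfaStep c ts
  | (x :: xs) :: ts =>
      if x = c then
        if xs.isEmpty then none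
        else (nfaStep c ts).map (fun l => xs :: l)
      else nfaStep c ts

-- outer `for ch in u` loop of Source B, carrying `active`
def nfaRun : List Char → List (List Char) → Bool
  | [], _ => false
  | c :: rest, active =>
      match nfaStep c (active ++ imagePatternsB) with
      | none => true
      | some nxt => nfaRun rest nxt

def validate_image_url_alt (url : String) : Bool :=
  if url.toList.isEmpty then false
  else
    let u := PySem.Chars.lower url.toList
    if !(PySem.Chars.startswith u "http://".toList
         || PySem.Chars.startswith u "https://".toList) then false
    else nfaRun u []

-- ===== PRECONDITION & SPEC =====
def Spec_validate_image_url (url : String) (out : Bool) : Prop := out = validate_image_url_alt url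
instance (url : String) (out : Bool) : Decidable (Spec_validate_image_url url out) := by unfold Spec_validate_image_url; infer_instance

-- ===== CLAIM (what is proved, stated in full; the proofs are below) =====
def Claim_equal_validate_image_url : Prop := ∀ (url : String), Dom_validate_image_url url → Spec_validate_image_url url (validate_image_url url)

-- ===== LEMMAS AND PROOFS =====

theorem patternsA_eq_B : imagePatternsA = imagePatternsB := by decide

theorem patternsB_ne_nil : ∀ p ∈ imagePatternsB, p ≠ [] := by
  rw [← patternsA_eq_B]; decide

-- the inner loop returns `none` exactly when a tail `[c]` completes
theorem nfaStep_eq_none_iff (c : Char) (ts : List (List Char)) :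
    nfaStep c ts = none ↔ [c] ∈ ts := by
  induction ts with
  | nil => simp [nfaStep]
  | cons t ts ih =>
    match t with
    | [] => simp [nfaStep, ih]
    | x :: xs =>
      rw [nfaStep]
      split_ifs with hx hxs
      · subst hx
        simp [List.isEmpty_iff.mp hxs]
      · simp only [Option.map_eq_none_iff, ih, List.mem_cons]
        constructor
        · exact Or.inr
        · rintro (h | h)
          · cases h; simp at hxs
          · exact h
      · simp only [ih, List.mem_cons]
        constructor
        · exact Or.inr
        · rintro (h | h)
          · cases h; exact absurd rfl hx
          · exact h

-- when the inner loop does not early-return, the new `active` matches a prefix of s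
-- iff some old tail matched a prefix of c :: s
theorem nfaStep_some_prefix (c : Char) (ts nxt : List (List Char))
    (hne : ∀ t ∈ ts, t ≠ []) (hs : nfaStep c ts = some nxt) (s : List Char) :
    ((∃ t ∈ nxt, t <+: s) ↔ ∃ t ∈ ts, t <+: c :: s) ∧ (∀ t ∈ nxt, t ≠ []) := by
  induction ts generalizing nxt with
  | nil =>
    simp only [nfaStep, Option.some.injEq] at hs
    subst hs; simp
  | cons t ts ih =>
    match t with
    | [] => exact absurd rfl (hne [] (by simp))
    | x :: xs =>
      have hne' : ∀ t ∈ ts, t ≠ [] := fun t ht => hne t (by simp [ht])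
      rw [nfaStep] at hs
      split_ifs at hs with hx hxs
      · subst hx
        rcases hmap : nfaStep x ts with _ | nxt'
        · rw [hmap] at hs; simp at hs
        · rw [hmap] at hs
          simp only [Option.map_some, Option.some.injEq] at hs
          subst hs
          obtain ⟨hiff, hnn⟩ := ih nxt' hne' hmap
          refine ⟨?_, ?_⟩
          · simp only [List.mem_cons]
            constructor
            · rintro ⟨u, hu, hp⟩
              rcases hu with h | hu
              · exact ⟨x :: xs, Or.inl rfl, by rw [h] at hp; simpa [List.cons_prefix_cons] using hp⟩
              · obtain ⟨v, hv, hvp⟩ := hiff.mp ⟨u, hu, hp⟩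
                exact ⟨v, Or.inr hv, hvp⟩
            · rintro ⟨u, hu, hp⟩
              rcases hu with h | hu
              · exact ⟨xs, Or.inl rfl, by rw [h] at hp; simpa [List.cons_prefix_cons] using hp⟩
              · obtain ⟨v, hv, hvp⟩ := hiff.mpr ⟨u, hu, hp⟩
                exact ⟨v, Or.inr hv, hvp⟩
          · intro u hu
            rcases List.mem_cons.mp hu with h | h
            · subst h; simpa using hxs
            · exact hnn u h
      · obtain ⟨hiff, hnn⟩ := ih nxt hne' hs
        refine ⟨?_, hnn⟩
        rw [hiff]
        simp only [List.mem_cons]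
        constructor
        · rintro ⟨u, hu, hp⟩; exact ⟨u, Or.inr hu, hp⟩
        · rintro ⟨u, (rfl | hu), hp⟩
          · rcases hp with ⟨w, hw⟩
            cases hw
            exact absurd rfl hx
          · exact ⟨u, hu, hp⟩

-- characterisation of the whole forward pass
theorem nfaRun_eq_true_iff (u : List Char) (active : List (List Char))
    (hne : ∀ t ∈ active, t ≠ []) :
    nfaRun u active = true ↔
      (∃ t ∈ active, t <+: u) ∨ (∃ p ∈ imagePatternsB, p <:+: u) := by
  induction u generalizing active with
  | nil =>
    rw [nfaRun]
    simp only [Bool.false_eq_true, false_iff]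
    rintro (⟨t, ht, hp⟩ | ⟨p, hp, hinf⟩)
    · exact absurd (List.prefix_nil.mp hp) (hne t ht)
    · exact absurd (List.infix_nil.mp hinf) (patternsB_ne_nil p hp)
  | cons c rest ih =>
    have hneA : ∀ t ∈ active ++ imagePatternsB, t ≠ [] := by
      intro t ht
      rcases List.mem_append.mp ht with h | h
      · exact hne t h
      · exact patternsB_ne_nil t h
    rw [nfaRun]
    rcases hstep : nfaStep c (active ++ imagePatternsB) with _ | nxt
    · simp only [true_iff]
      have hc : [c] ∈ active ++ imagePatternsB := (nfaStep_eq_none_iff c _).mp hstep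
      rcases List.mem_append.mp hc with h | h
      · exact Or.inl ⟨[c], h, by simp⟩
      · exact Or.inr ⟨[c], h, ⟨[], rest, rfl⟩⟩
    · obtain ⟨hiff, hnn⟩ := nfaStep_some_prefix c _ nxt hneA hstep rest
      rw [ih nxt hnn, hiff]
      constructor
      · rintro (⟨t, ht, hp⟩ | ⟨p, hp, hinf⟩)
        · rcases List.mem_append.mp ht with h | h
          · exact Or.inl ⟨t, h, hp⟩
          · exact Or.inr ⟨t, h, hp.isInfix⟩
        · exact Or.inr ⟨p, hp, hinf.trans (List.suffix_cons c rest).isInfix⟩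
      · rintro (⟨t, ht, hp⟩ | ⟨p, hp, hinf⟩)
        · exact Or.inl ⟨t, List.mem_append.mpr (Or.inl ht), hp⟩
        · rcases List.infix_cons_iff.mp hinf with hpre | hinf'
          · exact Or.inl ⟨p, List.mem_append.mpr (Or.inr hp), hpre⟩
          · exact Or.inr ⟨p, hp, hinf'⟩

-- A's any()-of-substring-tests equals B's one-pass scan, on any character list
theorem any_isIn_eq_nfaRun (u : List Char) :
    imagePatternsA.any (fun p => PySem.Chars.isIn p u) = nfaRun u [] := by
  rw [Bool.eq_iff_iff, nfaRun_eq_true_iff u [] (by simp), patternsA_eq_B]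
  simp only [List.any_eq_true, PySem.Chars.isIn_iff_infix, List.not_mem_nil,
    false_and, exists_const, false_or]

theorem validate_image_url_spec : Claim_equal_validate_image_url := by
  intro url _
  unfold Spec_validate_image_url validate_image_url validate_image_url_alt
  split_ifs with h1
  · rfl
  · dsimp only
    split_ifs with h2
    · rfl
    · exact any_isIn_eq_nfaRun _
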